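-- pv_equiv track=rewrite | github.com/pypi-data/pypi-mirror-367 | packages/HoloAI/holoai-0.3.5-py3-none-any.whl/HoloAI/HAIUtils/HAIUtils.py | _parseJsonFormat
-- ===== SOURCE A (Python) =====
-- def formatJsonExtended(role: str, content: str) -> dict:
--     """
--     Extended JSON format for APIs like OpenAI, Groq, etc.
--     Maps 'assistant', 'developer', and 'system' to 'assistant'.
--     All other roles (including 'user') map to 'user'.
--     """
--     roleLower = role.lower()
--     roleMap = {
--         "assistant": "assistant",
--         "developer": "assistant",
--         "system": "assistant",
--         "model": "assistant"
--         # "developer": "system",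
--         # "system": "system"
--     }
--     finalRole = roleMap.get(roleLower, "user")
--     return {"role": finalRole, "content": content}
--
-- def _parseJsonFormat(raw: str) -> dict:
--     """
--     Parses a single raw string with optional role prefix (user:, system:, developer:, assistant:)
--     and returns a normalized JSON message via formatJsonExtended.
--     """
--     lowered = raw.strip()
--     detectedRole = "user"
--     detectedContent = lowered
--     for prefix in ("user:", "system:", "developer:", "assistant:"):
--         if lowered.lower().startswith(prefix):
--             detectedRole = prefix[:-1].lower()
--             detectedContent = lowered[len(prefix):].strip()
--             break
--     return formatJsonExtended(detectedRole, detectedContent)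
-- ===== SOURCE B (Python) =====
-- def _parseJsonFormat(raw: str) -> dict:
--     text = raw.strip()
--     i = text.find(':')
--     if i != -1:
--         role = text[:i].lower()
--         if role in ("user", "system", "developer", "assistant"):
--             return {"role": "user" if role == "user" else "assistant",
--                     "content": text[i + 1:].strip()}
--     return {"role": "user", "content": text}
-- ===== Notes on version B (the rewrite author's own statement) =====
-- stated objective: idiomatic
-- what changed: B replaces A's ordered scan over the four fixed role prefixes with startswith by a single split of the stripped string at its first colon plus one membership test of the lowered head, and maps the head directly to user/assistant instead of routing through formatJsonExtended's dict lookup.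
import Mathlib
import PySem

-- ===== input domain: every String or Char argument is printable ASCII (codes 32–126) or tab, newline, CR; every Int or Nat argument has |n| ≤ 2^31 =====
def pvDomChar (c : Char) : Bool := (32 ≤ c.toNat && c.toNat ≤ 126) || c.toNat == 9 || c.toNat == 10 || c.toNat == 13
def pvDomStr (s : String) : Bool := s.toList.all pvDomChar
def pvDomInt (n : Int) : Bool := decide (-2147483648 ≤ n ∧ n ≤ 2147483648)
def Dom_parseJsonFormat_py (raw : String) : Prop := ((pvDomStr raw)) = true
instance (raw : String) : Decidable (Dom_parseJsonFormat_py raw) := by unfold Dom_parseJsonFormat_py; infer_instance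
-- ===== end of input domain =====

-- B replaces A's fixed-prefix startswith scan by a single split at the first colon plus a membership test (objective: idiomatic).

-- ===== PORT A =====
def pvFormatJsonExtended (role content : String) : List (String × String) :=
  let roleLower := PySem.Str.lower role
  let roleMap : PySem.Dict String String := PySem.Dict.ofList
    [("assistant","assistant"),("developer","assistant"),("system","assistant"),("model","assistant")]
  let finalRole := roleMap.getD roleLower "user"
  [("role", finalRole), ("content", content)]

def pvDetectLoop (lowered : String) : List String → String × String
  | [] => ("user", lowered)
  | p :: ps =>
    if PySem.Str.startswith (PySem.Str.lower lowered) p = true then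
      (PySem.Str.lower (PySem.Str.slice p none (some (-1))),
       PySem.Str.strip (PySem.Str.slice lowered (some (PySem.Str.len p : Int)) none))
    else pvDetectLoop lowered ps

def parseJsonFormat_py (raw : String) : List (String × String) :=
  let lowered := PySem.Str.strip raw
  let rc := pvDetectLoop lowered ["user:", "system:", "developer:", "assistant:"]
  pvFormatJsonExtended rc.1 rc.2

-- ===== PORT B =====
def parseJsonFormat_py_alt (raw : String) : List (String × String) :=
  let text := PySem.Str.strip raw
  let i := PySem.Str.find text ":"
  if i ≠ -1 then
    let role := PySem.Str.lower (PySem.Str.slice text none (some i))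
    if role ∈ ["user", "system", "developer", "assistant"] then
      [("role", if role == "user" then "user" else "assistant"),
       ("content", PySem.Str.strip (PySem.Str.slice text (some (i+1)) none))]
    else [("role", "user"), ("content", text)]
  else [("role", "user"), ("content", text)]

-- ===== PRECONDITION & SPEC =====
def Spec_parseJsonFormat_py (raw : String) (out : List (String × String)) : Prop := out = parseJsonFormat_py_alt raw
instance (raw : String) (out : List (String × String)) : Decidable (Spec_parseJsonFormat_py raw out) := by unfold Spec_parseJsonFormat_py; infer_instance

-- ===== CLAIM (what is proved, stated in full; the proofs are below) =====
def Claim_equal_parseJsonFormat_py : Prop := ∀ (raw : String), Dom_parseJsonFormat_py raw → Spec_parseJsonFormat_py raw (parseJsonFormat_py raw)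

-- ===== LEMMAS AND PROOFS =====

theorem pvLowerChar_colon (c : Char) : PySem.Chars.lowerChar c = ':' ↔ c = ':' := by
  unfold PySem.Chars.lowerChar
  by_cases hu : PySem.Chars.isupper c = true
  · simp only [hu, if_true]
    simp [PySem.Chars.isupper, Char.le_def] at hu
    have hv : Char.isValidCharNat (c.toNat + 32) := by
      unfold Char.isValidCharNat; left
      have : c.toNat ≤ 90 := hu.2
      omega
    constructor
    · intro h
      exfalso
      have h58 : (Char.ofNat (c.toNat + 32)).toNat = 58 := by rw [h]; decide
      rw [show (Char.ofNat (c.toNat + 32)).toNat = c.toNat + 32 from by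
        simp only [Char.ofNat, hv, dif_pos]; rfl] at h58
      have : 65 ≤ c.toNat := hu.1
      omega
    · intro h
      exfalso
      subst h
      simp at hu
  · simp [hu]

theorem pvSingle_prefix (c : Char) (l : List Char) : [c] <+: l ↔ l.head? = some c := by
  cases l with
  | nil => simp
  | cons x t => simp [List.cons_prefix_cons, eq_comm]

theorem pvFind_eq_iff (L : List Char) (k : Nat) :
    PySem.Chars.find L [':'] = (k : Int) ↔ (L[k]? = some ':' ∧ ∀ j < k, L[j]? ≠ some ':') := by
  have hsp : ∀ (j : Nat), ([':'] <+: L.drop j ↔ L[j]? = some ':') := fun j => by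
    rw [pvSingle_prefix, List.head?_drop]
  constructor
  · intro h
    have h0 : 0 ≤ PySem.Chars.find L [':'] := by rw [h]; positivity
    obtain ⟨h1, h2⟩ := PySem.Chars.find_spec h0
    rw [h] at h1 h2
    simp only [Int.toNat_natCast] at h1 h2
    exact ⟨(hsp k).mp h1, fun j hj hc => h2 j hj ((hsp j).mpr hc)⟩
  · rintro ⟨h1, h2⟩
    have hmem : (':' : Char) ∈ L := by
      have := List.getElem?_eq_some_iff.mp h1
      exact List.mem_of_getElem this.choose_spec
    have hinf : ([':'] : List Char) <:+: L := by
      obtain ⟨s, t, rfl⟩ := List.append_of_mem hmem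
      exact ⟨s, t, by simp⟩
    have h0 : 0 ≤ PySem.Chars.find L [':'] := (PySem.Chars.find_nonneg_iff _ _).mpr hinf
    obtain ⟨h1', h2'⟩ := PySem.Chars.find_spec h0
    set m := (PySem.Chars.find L [':']).toNat with hm
    have : m = k := by
      by_contra hne
      rcases Nat.lt_or_ge m k with hlt | hge
      · exact h2 m hlt ((hsp m).mp h1')
      · exact h2' k (by omega) ((hsp k).mpr h1)
    omega

theorem pvK1 (L p : List Char) (hp : (':' : Char) ∉ p) :
    (p ++ [':']) <+: PySem.Chars.lower L ↔
      (PySem.Chars.find L [':'] = (p.length : Int) ∧ PySem.Chars.lower (L.take p.length) = p) := by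
  set n := p.length with hn
  rw [pvFind_eq_iff]
  constructor
  · intro h
    have htake := List.prefix_iff_eq_take.mp h
    have hlen : n + 1 ≤ L.length := by
      have := List.IsPrefix.length_le h
      simpa [PySem.Chars.lower, hn] using this
    have hmap : p ++ [':'] = (L.take (n+1)).map PySem.Chars.lowerChar := by
      rw [htake]; simp [PySem.Chars.lower, List.map_take, hn]
    have hget : ∀ j : Nat, j < n + 1 → (p ++ [':'])[j]? = (L[j]?.map PySem.Chars.lowerChar) := by
      intro j hj
      rw [hmap]
      simp [List.getElem?_map, hj]
    have hcol : L[n]? = some ':' := by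
      have hx : (p ++ [':'])[n]? = some ':' := by rw [hn]; exact List.getElem?_concat_length
      have hg := hget n (by omega)
      rw [hx] at hg
      obtain ⟨a, ha, hla⟩ := Option.map_eq_some_iff.mp hg.symm
      rw [ha, (pvLowerChar_colon a).mp hla]
    refine ⟨⟨hcol, ?_⟩, ?_⟩
    · intro j hj hc
      have hg := hget j (by omega)
      rw [hc] at hg
      have hpj : p[j]? = some ':' := by
        rw [← List.getElem?_append_left (by omega : j < p.length), hg]
        decide
      exact hp (List.mem_of_getElem? hpj)
    · have h2 := congrArg (List.take n) hmap
      rw [List.take_append_of_le_length (by omega)] at h2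
      rw [← List.map_take, List.take_take, Nat.min_eq_left (by omega)] at h2
      have hlp : List.take n p = p := by rw [hn]; exact List.take_length
      rw [hlp] at h2
      show (List.take n L).map PySem.Chars.lowerChar = p
      exact h2.symm
  · rintro ⟨⟨hcol, hmin⟩, hlow⟩
    have hklen : n < L.length := (List.getElem?_eq_some_iff.mp hcol).1
    rw [List.prefix_iff_eq_take]
    have hlen1 : (p ++ [':']).length = n + 1 := by simp [hn]
    rw [hlen1]
    show p ++ [':'] = (PySem.Chars.lower L).take (n+1)
    have : (PySem.Chars.lower L).take (n+1) = (L.take (n+1)).map PySem.Chars.lowerChar := by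
      simp [PySem.Chars.lower, List.map_take]
    rw [this, List.take_add_one, hcol]
    simp only [Option.toList_some, List.map_append, List.map_cons, List.map_nil]
    rw [show PySem.Chars.lowerChar ':' = ':' from by decide]
    rw [show (L.take n).map PySem.Chars.lowerChar = PySem.Chars.lower (L.take n) from rfl, hlow]

theorem pvStr_ext (a b : String) (h : a.toList = b.toList) : a = b := String.toList_injective h

theorem pvColon_toList : (":" : String).toList = [':'] := rfl

theorem pvRoleCase (s p q : String) (n : Nat)
    (hq : q.toList = p.toList ++ [':']) (hp : (':' : Char) ∉ p.toList)
    (hn : p.toList.length = n)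
    (h : PySem.Str.startswith (PySem.Str.lower s) q = true) :
    PySem.Str.find s ":" = (n : Int) ∧
      PySem.Str.lower (PySem.Str.slice s none (some (n : Int))) = p := by
  rw [PySem.Str.startswith_eq, PySem.Chars.startswith_iff, PySem.Str.toList_lower, hq] at h
  obtain ⟨hf, hl⟩ := (pvK1 s.toList p.toList hp).mp h
  rw [hn] at hf hl
  refine ⟨by rw [PySem.Str.find_eq, pvColon_toList]; exact hf, ?_⟩
  apply pvStr_ext
  rw [PySem.Str.toList_lower, PySem.Str.toList_slice, PySem.Chars.slice_eq_listSlice,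
    PySem.List.slice_to _ (by positivity), Int.toNat_natCast]
  exact hl

theorem pvRoleCaseRev (s p q : String) (k : Nat)
    (hq : q.toList = p.toList ++ [':']) (hp : (':' : Char) ∉ p.toList)
    (hfind : PySem.Str.find s ":" = (k : Int))
    (hrole : PySem.Str.lower (PySem.Str.slice s none (some (k : Int))) = p) :
    PySem.Str.startswith (PySem.Str.lower s) q = true := by
  rw [PySem.Str.find_eq, pvColon_toList] at hfind
  have hrl : PySem.Chars.lower (s.toList.take k) = p.toList := by
    have := congrArg String.toList hrole
    rwa [PySem.Str.toList_lower, PySem.Str.toList_slice, PySem.Chars.slice_eq_listSlice,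
      PySem.List.slice_to _ (by positivity), Int.toNat_natCast] at this
  have hklen : k < s.toList.length := by
    have := ((pvFind_eq_iff s.toList k).mp hfind).1
    exact (List.getElem?_eq_some_iff.mp this).1
  have hlen : p.toList.length = k := by
    rw [← hrl]
    simp only [PySem.Chars.lower, List.length_map, List.length_take]
    omega
  rw [PySem.Str.startswith_eq, PySem.Chars.startswith_iff, PySem.Str.toList_lower, hq]
  apply (pvK1 s.toList p.toList hp).mpr
  rw [hlen]
  exact ⟨hfind, hrl⟩

theorem pvMain (s : String) :
    pvFormatJsonExtended (pvDetectLoop s ["user:", "system:", "developer:", "assistant:"]).1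
        (pvDetectLoop s ["user:", "system:", "developer:", "assistant:"]).2 =
      (if PySem.Str.find s ":" ≠ -1 then
        if PySem.Str.lower (PySem.Str.slice s none (some (PySem.Str.find s ":"))) ∈
            ["user", "system", "developer", "assistant"] then
          [("role", if PySem.Str.lower (PySem.Str.slice s none (some (PySem.Str.find s ":"))) == "user"
                    then "user" else "assistant"),
           ("content", PySem.Str.strip (PySem.Str.slice s (some (PySem.Str.find s ":" + 1)) none))]
        else [("role", "user"), ("content", s)]
      else [("role", "user"), ("content", s)]) := by
  by_cases h1 : PySem.Str.startswith (PySem.Str.lower s) "user:" = true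
  · obtain ⟨hf, hr⟩ := pvRoleCase s "user" "user:" 4 (by decide) (by decide) (by decide) h1
    have hf' : PySem.Str.find s ":" = (4 : Int) := by exact_mod_cast hf
    have hr' : PySem.Str.lower (PySem.Str.slice s none (some (4 : Int))) = "user" := by
      exact_mod_cast hr
    simp only [pvDetectLoop, h1, if_true, hf', hr']
    norm_num
    rw [show PySem.Str.lower (PySem.Str.slice "user:" none (some (-1))) = "user" from by decide,
        show ("user:".length : Int) = 5 from by decide]
    rfl
  · by_cases h2 : PySem.Str.startswith (PySem.Str.lower s) "system:" = true
    · obtain ⟨hf, hr⟩ := pvRoleCase s "system" "system:" 6 (by decide) (by decide) (by decide) h2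
      have hf' : PySem.Str.find s ":" = (6 : Int) := by exact_mod_cast hf
      have hr' : PySem.Str.lower (PySem.Str.slice s none (some (6 : Int))) = "system" := by
        exact_mod_cast hr
      simp only [pvDetectLoop, h1, h2, if_true, hf', hr']
      norm_num
      rw [show PySem.Str.lower (PySem.Str.slice "system:" none (some (-1))) = "system" from by decide,
          show ("system:".length : Int) = 7 from by decide]
      rw [if_neg (by decide : ¬(("system" : String) = "user"))]
      rfl
    · by_cases h3 : PySem.Str.startswith (PySem.Str.lower s) "developer:" = true
      · obtain ⟨hf, hr⟩ := pvRoleCase s "developer" "developer:" 9 (by decide) (by decide) (by decide) h3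
        have hf' : PySem.Str.find s ":" = (9 : Int) := by exact_mod_cast hf
        have hr' : PySem.Str.lower (PySem.Str.slice s none (some (9 : Int))) = "developer" := by
          exact_mod_cast hr
        simp only [pvDetectLoop, h1, h2, h3, if_true, hf', hr']
        norm_num
        rw [show PySem.Str.lower (PySem.Str.slice "developer:" none (some (-1))) = "developer" from by decide,
            show ("developer:".length : Int) = 10 from by decide]
        rw [if_neg (by decide : ¬(("developer" : String) = "user"))]
        rfl
      · by_cases h4 : PySem.Str.startswith (PySem.Str.lower s) "assistant:" = true
        · obtain ⟨hf, hr⟩ := pvRoleCase s "assistant" "assistant:" 9 (by decide) (by decide) (by decide) h4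
          have hf' : PySem.Str.find s ":" = (9 : Int) := by exact_mod_cast hf
          have hr' : PySem.Str.lower (PySem.Str.slice s none (some (9 : Int))) = "assistant" := by
            exact_mod_cast hr
          simp only [pvDetectLoop, h1, h2, h3, h4, if_true, hf', hr']
          norm_num
          rw [show PySem.Str.lower (PySem.Str.slice "assistant:" none (some (-1))) = "assistant" from by decide,
              show ("assistant:".length : Int) = 10 from by decide]
          rw [if_neg (by decide : ¬(("assistant" : String) = "user"))]
          rfl
        · simp only [pvDetectLoop, h1, h2, h3, h4, Bool.false_eq_true, if_false]
          by_cases hi : PySem.Str.find s ":" = -1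
          · rw [if_neg (not_ne_iff.mpr hi)]
            rfl
          · have h0 : 0 ≤ PySem.Str.find s ":" := by
              have hge : -1 ≤ PySem.Str.find s ":" := by
                rw [PySem.Str.find_eq]
                exact PySem.Chars.neg_one_le_find _ _
              omega
            obtain ⟨k, hk⟩ : ∃ k : Nat, PySem.Str.find s ":" = (k : Int) :=
              ⟨(PySem.Str.find s ":").toNat, (Int.toNat_of_nonneg h0).symm⟩
            have hm : PySem.Str.lower (PySem.Str.slice s none (some (PySem.Str.find s ":"))) ∉
                (["user", "system", "developer", "assistant"] : List String) := by
              intro hm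
              rw [hk] at hm
              simp only [List.mem_cons, List.not_mem_nil, or_false] at hm
              rcases hm with hm | hm | hm | hm
              · exact h1 (pvRoleCaseRev s "user" "user:" k (by decide) (by decide) hk hm)
              · exact h2 (pvRoleCaseRev s "system" "system:" k (by decide) (by decide) hk hm)
              · exact h3 (pvRoleCaseRev s "developer" "developer:" k (by decide) (by decide) hk hm)
              · exact h4 (pvRoleCaseRev s "assistant" "assistant:" k (by decide) (by decide) hk hm)
            rw [if_pos hi, if_neg hm]
            rfl

-- ===== VERDICT (by name: the statement is the Claim_ definition above) =====
theorem parseJsonFormat_py_spec : Claim_equal_parseJsonFormat_py := by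
  intro raw _
  unfold Spec_parseJsonFormat_py parseJsonFormat_py parseJsonFormat_py_alt
  exact pvMain (PySem.Str.strip raw)
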